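-- pv_equiv track=rewrite | github.com/ejegrova/AoC_21 | 2025/02.py | invalid_ids_within_range
-- ===== SOURCE A (Python) =====
-- def invalid_ids_within_range(range_values):
--     """Get range of values and get the invalid ones."""
--     invalid_ids = []
--     for value in range_values:
--         value_length = len(value)
--         for chunk_size in range(1, value_length):
--             if value_length % chunk_size:
--                 continue
--
--             separate_strings = [
--                 value[i : i + chunk_size] for i in range(0, value_length, chunk_size)
--             ]
--             if all(chunks == separate_strings[0] for chunks in separate_strings):
--                 invalid_ids.append(int(value))
--
--     return set(invalid_ids)
-- ===== SOURCE B (Python) =====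
-- def invalid_ids_within_range(range_values):
--     """Get range of values and get the invalid ones."""
--     invalid_ids = set()
--     for value in range_values:
--         # value is a repetition of a shorter block  iff  it occurs in its
--         # doubling with both ends clipped (classic O(L) periodicity test).
--         if value and value in (value + value)[1:-1]:
--             invalid_ids.add(int(value))
--     return invalid_ids
-- ===== Notes on version B (the rewrite author's own statement) =====
-- stated objective: faster
-- what changed: Replaces the per-value loop over all proper divisors that builds and compares a chunk list for each divisor by a single O(L) periodicity test per value ('value in (value+value)[1:-1]'), collecting results directly into a set.
import Mathlib
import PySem

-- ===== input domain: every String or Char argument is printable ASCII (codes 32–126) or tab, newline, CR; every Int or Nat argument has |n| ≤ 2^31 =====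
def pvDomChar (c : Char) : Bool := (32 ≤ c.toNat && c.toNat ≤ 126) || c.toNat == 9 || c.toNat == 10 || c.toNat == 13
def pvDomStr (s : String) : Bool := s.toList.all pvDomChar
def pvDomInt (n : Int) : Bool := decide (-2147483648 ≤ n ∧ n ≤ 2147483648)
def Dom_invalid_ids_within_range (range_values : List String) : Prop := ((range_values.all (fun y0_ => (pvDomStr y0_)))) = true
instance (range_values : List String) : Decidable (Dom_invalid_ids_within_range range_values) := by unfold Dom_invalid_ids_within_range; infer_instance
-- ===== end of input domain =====

-- B replaces A's per-value scan over all proper divisors (building a chunk list per divisor)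
-- by one doubling-trick periodicity test per value ('value in (value+value)[1:-1]'), collected into a set.

-- ===== PORT A =====
def invalid_ids_within_range (range_values : List String) : List Int :=
  PySem.Set.ofList (range_values.foldl (fun invalid_ids value =>
    let cs := value.toList
    let value_length : Int := PySem.Chars.len cs
    (PySem.List.pyRange 1 value_length 1).foldl (fun invalid_ids chunk_size =>
      if PySem.Int.mod value_length chunk_size ≠ 0 then invalid_ids
      else
        let separate_strings := (PySem.List.pyRange 0 value_length chunk_size).map
          (fun i => PySem.List.slice cs (some i) (some (i + chunk_size)))
        if separate_strings.all
            (fun chunks => chunks == (PySem.List.pyGet? separate_strings 0).getD [])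
        then invalid_ids ++ [(PySem.Int.ofChars? cs).getD 0]
        else invalid_ids) invalid_ids) [])

-- ===== PORT B =====
def invalid_ids_within_range_alt (range_values : List String) : List Int :=
  range_values.foldl (fun invalid_ids value =>
    let cs := value.toList
    if cs ≠ [] ∧ PySem.Chars.isIn cs (PySem.List.slice (cs ++ cs) (some 1) (some (-1))) = true
    then PySem.Set.add invalid_ids ((PySem.Int.ofChars? cs).getD 0)
    else invalid_ids) PySem.Set.empty

-- ===== PRECONDITION & SPEC =====
-- Pre_ excludes exactly the inputs on which Python A raises ValueError: some value that IS a
-- repetition of a shorter block (so A reaches int(value)) but is not parseable as an int.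
def Pre_invalid_ids_within_range (range_values : List String) : Prop :=
  ∀ v ∈ range_values,
    (∃ d ∈ List.range v.toList.length,
        1 ≤ d ∧ d ∣ v.toList.length ∧ v.toList <+: v.toList.take d ++ v.toList) →
    (PySem.Int.ofChars? v.toList).isSome = true
instance (range_values : List String) : Decidable (Pre_invalid_ids_within_range range_values) := by
  unfold Pre_invalid_ids_within_range; infer_instance
def pvWitness_invalid_ids_within_range : List String := ["1212", "11", "123", "7", ""]
def Spec_invalid_ids_within_range (range_values : List String) (out : List Int) : Prop := out = invalid_ids_within_range_alt range_values
instance (range_values : List String) (out : List Int) : Decidable (Spec_invalid_ids_within_range range_values out) := by unfold Spec_invalid_ids_within_range; infer_instance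

-- ===== CLAIM (what is proved, stated in full; the proofs are below) =====
def Claim_equal_invalid_ids_within_range : Prop := ∀ (range_values : List String), Dom_invalid_ids_within_range range_values → Pre_invalid_ids_within_range range_values → Spec_invalid_ids_within_range range_values (invalid_ids_within_range range_values)

-- ===== LEMMAS AND PROOFS =====

-- the canonical per-value condition: the char list has a proper-divisor period
def pvPerEx (cs : List Char) : Prop :=
  ∃ d : ℕ, 1 ≤ d ∧ d < cs.length ∧ d ∣ cs.length ∧ List.HasPeriod cs d

-- A's per-(value, chunk_size) test, as it appears in the port
def pvAllB (cs : List Char) (chunk_size : Int) : Bool :=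
  ((PySem.List.pyRange 0 (PySem.Chars.len cs) chunk_size).map
      (fun i => PySem.List.slice cs (some i) (some (i + chunk_size)))).all
    (fun chunks => chunks == (PySem.List.pyGet? ((PySem.List.pyRange 0 (PySem.Chars.len cs) chunk_size).map
      (fun i => PySem.List.slice cs (some i) (some (i + chunk_size)))) 0).getD [])

-- the combined guard of A's inner loop
def pvCondA (cs : List Char) (chunk_size : Int) : Bool :=
  (PySem.Int.mod (PySem.Chars.len cs) chunk_size == 0) && pvAllB cs chunk_size

-- the int A and B both append for a periodic value
def pvKv (cs : List Char) : Int := (PySem.Int.ofChars? cs).getD 0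

theorem pv_slice_middle (l : List Char) :
    PySem.List.slice l (some 1) (some (-1)) = (l.drop 1).dropLast := by
  simp [PySem.List.slice, List.dropLast_eq_take, List.drop_one]
  cases l <;> simp

theorem pv_dropLast_drop (l : List Char) (j : ℕ) : l.dropLast.drop j = (l.drop j).dropLast := by
  rw [List.dropLast_eq_take, List.dropLast_eq_take, List.drop_take, List.length_drop]
  congr 1; omega

theorem pv_prefix_dropLast {u v : List Char} (h : u <+: v) (hl : u.length < v.length) :
    u <+: v.dropLast := by
  rw [List.dropLast_eq_take, List.prefix_take_iff]; exact ⟨h, by omega⟩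

theorem pv_hasPeriod_of_rot (l : List Char) (i : ℕ) (hrot : l.drop i ++ l.take i = l) :
    List.HasPeriod l i := by
  have h2 : l.take i ++ l = l ++ l.take i := by
    calc l.take i ++ l = l.take i ++ (l.drop i ++ l.take i) := by rw [hrot]
    _ = (l.take i ++ l.drop i) ++ l.take i := by rw [List.append_assoc]
    _ = l ++ l.take i := by rw [List.take_append_drop]
  unfold List.HasPeriod
  rw [h2]
  exact List.prefix_append l (l.take i)

theorem pv_rot_of_hasPeriod (l : List Char) (d : ℕ) (hlt : d < l.length)
    (hdvd : d ∣ l.length) (hp : List.HasPeriod l d) : l.drop d ++ l.take d = l := by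
  have per := List.hasPeriod_iff_forall_getElem?_mod.mp hp
  apply List.ext_getElem?
  intro j
  rcases lt_or_ge j l.length with hj | hj
  · rcases lt_or_ge j (l.length - d) with hcase | hcase
    · rw [List.getElem?_append_left (by simp [List.length_drop]; omega)]
      rw [List.getElem?_drop]
      rw [per (d + j) (by omega), per j hj, Nat.add_mod_left]
    · rw [List.getElem?_append_right (by simp [List.length_drop]; omega)]
      simp only [List.length_drop]
      rw [List.getElem?_take_of_lt (by omega)]
      rw [per j hj]
      congr 1
      obtain ⟨q, hq⟩ := (Nat.dvd_sub hdvd (dvd_refl d) : d ∣ l.length - d)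
      have hle : d * q ≤ j := by omega
      have h2 : (j - (l.length - d)) % d = j % d := by
        rw [hq, Nat.sub_mul_mod hle]
      rw [← h2, Nat.mod_eq_of_lt (by omega)]
  · have hlen : (l.drop d ++ l.take d).length ≤ j := by
      simp [List.length_append, List.length_drop, List.length_take]; omega
    rw [List.getElem?_eq_none hlen, List.getElem?_eq_none (by omega)]

-- B's doubling test equals "has a proper-divisor period"
theorem pv_isin_iff (cs : List Char) (hne : cs ≠ []) :
    PySem.Chars.isIn cs (PySem.List.slice (cs ++ cs) (some 1) (some (-1))) = true ↔ pvPerEx cs := by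
  rw [pv_slice_middle, ← PySem.Chars.exists_prefix_drop_iff_isIn]
  have hn : 0 < cs.length := List.length_pos_iff.mpr hne
  constructor
  · rintro ⟨j, hpref⟩
    set i : ℕ := 1 + j with hi
    rw [pv_dropLast_drop, List.drop_drop] at hpref
    have hlen := hpref.length_le
    have hlen2 : ((cs ++ cs).drop (1 + j)).dropLast.length = (cs.length + cs.length - (1+j)) - 1 := by
      simp [List.length_dropLast, List.length_drop, List.length_append]
    have hile : i ≤ cs.length - 1 := by omega
    have hi1 : 1 ≤ i := by omega
    have hin : i ≤ cs.length := by omega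
    have hpref2 : cs <+: (cs ++ cs).drop i := hpref.trans (List.dropLast_prefix _)
    rw [List.drop_append_of_le_length hin] at hpref2
    have heq := List.prefix_iff_eq_take.mp hpref2
    rw [List.take_append, List.take_of_length_le (by simp only [List.length_drop]; omega)] at heq
    simp only [List.length_drop] at heq
    rw [show cs.length - (cs.length - i) = i from by omega] at heq
    have hrot : cs.drop i ++ cs.take i = cs := heq.symm
    have hperi : List.HasPeriod cs i := pv_hasPeriod_of_rot cs i hrot
    have hroteq : cs.rotate i = cs := by
      rw [List.rotate_eq_drop_append_take hin]; exact hrot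
    have hrot2 : cs.rotate (cs.length - i) = cs := by
      have h3 := List.rotate_rotate cs i (cs.length - i)
      rw [hroteq, show i + (cs.length - i) = cs.length by omega, List.rotate_length] at h3
      exact h3
    have hperni : List.HasPeriod cs (cs.length - i) := by
      apply pv_hasPeriod_of_rot
      rw [← List.rotate_eq_drop_append_take (by omega)]
      exact hrot2
    have hgcd := hperi.gcd hperni (by
      have := Nat.gcd_pos_of_pos_left (cs.length - i) (show 0 < i by omega)
      omega)
    set g := Nat.gcd i (cs.length - i) with hg
    have hgpos : 0 < g := Nat.gcd_pos_of_pos_left _ (by omega)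
    have hgdvd : g ∣ cs.length := by
      rw [hg, Nat.gcd_sub_self_right hin]
      exact Nat.gcd_dvd_right i cs.length
    have hgle : g ≤ i := Nat.le_of_dvd (by omega) (Nat.gcd_dvd_left _ _)
    exact ⟨g, hgpos, by omega, hgdvd, hgcd⟩
  · rintro ⟨d, hd1, hdlt, hdvd, hp⟩
    refine ⟨d - 1, ?_⟩
    rw [pv_dropLast_drop, List.drop_drop, show 1 + (d-1) = d by omega]
    have hrot := pv_rot_of_hasPeriod cs d hdlt hdvd hp
    rw [List.drop_append_of_le_length (by omega)]
    have heq : cs.drop d ++ cs = cs ++ cs.drop d := by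
      calc cs.drop d ++ cs = cs.drop d ++ (cs.take d ++ cs.drop d) := by rw [List.take_append_drop]
      _ = (cs.drop d ++ cs.take d) ++ cs.drop d := by rw [List.append_assoc]
      _ = cs ++ cs.drop d := by rw [hrot]
    rw [heq]
    apply pv_prefix_dropLast (List.prefix_append cs (cs.drop d))
    simp only [List.length_append, List.length_drop]
    omega

theorem pv_chunk_all_iff (cs : List Char) (m k : ℕ) (h1 : 1 ≤ m) (hk : cs.length = m * k) :
    (∀ j < k, (cs.drop (j*m)).take m = cs.take m) ↔ List.HasPeriod cs m := by
  have hmk : m * k = k * m := Nat.mul_comm m k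
  rw [List.hasPeriod_iff_forall_getElem?_mod]
  constructor
  · intro h i hi
    have hdm : m * (i / m) + i % m = i := Nat.div_add_mod i m
    have hj : i / m < k := by
      rw [Nat.div_lt_iff_lt_mul (by omega)]; omega
    have hchunk := h (i / m) hj
    have hr : i % m < m := Nat.mod_lt _ (by omega)
    have e1 : ((cs.drop (i/m*m)).take m)[i % m]? = cs[i]? := by
      rw [List.getElem?_take_of_lt hr, List.getElem?_drop]
      congr 1
      have hcm : i/m*m = m*(i/m) := Nat.mul_comm _ _
      omega
    have e2 : (cs.take m)[i % m]? = cs[i % m]? := List.getElem?_take_of_lt hr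
    rw [← e1, hchunk, e2]
  · intro per j hj
    apply List.ext_getElem?
    intro r
    have hjm : j*m + m ≤ k*m := by
      have := Nat.mul_le_mul_right m (show j+1 ≤ k by omega)
      calc j*m + m = (j+1)*m := by ring
      _ ≤ k*m := this
    rcases lt_or_ge r m with hr | hr
    · rw [List.getElem?_take_of_lt hr, List.getElem?_take_of_lt hr, List.getElem?_drop]
      rw [per (j*m + r) (by omega), per r (by omega)]
      congr 1
      rw [show j*m + r = m*j + r by ring, Nat.mul_add_mod, Nat.mod_eq_of_lt hr]
    · rw [List.getElem?_eq_none, List.getElem?_eq_none]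
      · simp only [List.length_take]; omega
      · simp only [List.length_take]; omega

theorem pv_ss_eq (cs : List Char) (m k : ℕ) (h1 : 1 ≤ m) (h2 : m < cs.length)
    (hk : cs.length = m * k) :
    (PySem.List.pyRange 0 (PySem.Chars.len cs) (m : Int)).map
        (fun i => PySem.List.slice cs (some i) (some (i + (m : Int))))
      = (List.range k).map (fun j => (cs.drop (j*m)).take m) := by
  rw [PySem.Chars.len_eq, PySem.List.pyRange_of_pos 0 _ (by exact_mod_cast h1), List.map_map]
  have hcount : (if (0:Int) < (cs.length:Int) then (((cs.length:Int) - 0 + (m:Int) - 1) / (m:Int)).toNat else 0) = k := by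
    rw [if_pos (by exact_mod_cast Nat.lt_of_lt_of_le (by omega) (le_of_lt h2))]
    have e : ((cs.length:Int) - 0 + (m:Int) - 1) = ((m:Int)-1) + (k:Int)*(m:Int) := by
      rw [hk]; push_cast; ring
    rw [e, Int.add_mul_ediv_right _ _ (by exact_mod_cast (by omega : m ≠ 0) : (m:Int) ≠ 0)]
    rw [Int.ediv_eq_zero_of_lt (by omega) (by omega)]
    simp
  rw [hcount]
  apply List.map_congr_left
  intro j hj
  simp only [Function.comp]
  have hc : ((0:Int) + (m:Int)*(j:Int)) = ((j*m : ℕ) : Int) := by push_cast; ring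
  rw [hc, PySem.List.slice_natCast_add]

-- A's chunk test equals HasPeriod
theorem pv_chunks_iff (cs : List Char) (m : ℕ) (h1 : 1 ≤ m) (h2 : m < cs.length)
    (hdvd : m ∣ cs.length) : pvAllB cs (m : Int) = true ↔ List.HasPeriod cs m := by
  obtain ⟨k, hk⟩ := hdvd
  have hkpos : 0 < k := by
    rcases Nat.eq_zero_or_pos k with h | h
    · subst h; omega
    · exact h
  unfold pvAllB
  rw [pv_ss_eq cs m k h1 h2 hk, List.all_eq_true]
  have hhead : (PySem.List.pyGet? ((List.range k).map (fun j => (cs.drop (j*m)).take m)) 0).getD []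
      = cs.take m := by
    have h0 := PySem.List.pyGet?_natCast (xs := (List.range k).map (fun j => (cs.drop (j*m)).take m)) (n := 0)
    rw [show ((0:ℕ):Int) = (0:Int) from rfl] at h0
    rw [h0, List.getElem?_map, List.getElem?_range hkpos]
    simp
  rw [hhead, List.forall_mem_map]
  rw [← pv_chunk_all_iff cs m k h1 hk]
  constructor
  · intro h j hj
    exact beq_iff_eq.mp (h j (List.mem_range.mpr hj))
  · intro h j hj
    exact beq_iff_eq.mpr (h j (List.mem_range.mp hj))

-- A's inner-loop guard fires for some chunk size iff the value has a proper-divisor period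
theorem pv_exists_iff (cs : List Char) :
    (∃ d ∈ PySem.List.pyRange 1 (PySem.Chars.len cs) 1, pvCondA cs d = true) ↔ pvPerEx cs := by
  constructor
  · rintro ⟨d, hmem, hcond⟩
    rw [PySem.List.mem_pyRange_one] at hmem
    obtain ⟨h1, h2⟩ := hmem
    rw [PySem.Chars.len_eq] at h2
    obtain ⟨m, rfl⟩ := Int.eq_ofNat_of_zero_le (by omega : (0:Int) ≤ d)
    rw [pvCondA, Bool.and_eq_true, beq_iff_eq, PySem.Int.mod_eq_zero_iff_dvd, PySem.Chars.len_eq] at hcond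
    have hm1 : 1 ≤ m := by exact_mod_cast h1
    have hm2 : m < cs.length := by exact_mod_cast h2
    have hdvd : m ∣ cs.length := by exact_mod_cast hcond.1
    exact ⟨m, hm1, hm2, hdvd, (pv_chunks_iff cs m hm1 hm2 hdvd).mp hcond.2⟩
  · rintro ⟨m, hm1, hm2, hdvd, hp⟩
    refine ⟨(m:Int), ?_, ?_⟩
    · rw [PySem.List.mem_pyRange_one, PySem.Chars.len_eq]
      constructor <;> [exact_mod_cast hm1; exact_mod_cast hm2]
    · rw [pvCondA, Bool.and_eq_true, beq_iff_eq, PySem.Int.mod_eq_zero_iff_dvd, PySem.Chars.len_eq]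
      exact ⟨by exact_mod_cast hdvd, (pv_chunks_iff cs m hm1 hm2 hdvd).mpr hp⟩

-- updating a set with a nonempty constant list is a single add
theorem pv_update_const (k : Int) : ∀ (L : List Int), L ≠ [] → (∀ x ∈ L, x = k) →
    ∀ s : PySem.Set Int, PySem.Set.update s L = PySem.Set.add s k := by
  intro L
  induction L with
  | nil => intro h; exact absurd rfl h
  | cons x L' ih =>
    intro _ hall s
    have hx : x = k := hall x (List.mem_cons_self)
    subst hx
    rcases L' with _ | ⟨y, L''⟩
    · rw [PySem.Set.update_cons, PySem.Set.update_nil]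
    · rw [PySem.Set.update_cons,
        ih (by simp) (fun z hz => hall z (List.mem_cons_of_mem _ hz)) (s.add x)]
      exact PySem.Set.add_of_mem ((PySem.Set.mem_add s x x).mpr (Or.inr rfl))

-- A's inner loop appends one copy of the value's int per qualifying chunk size
theorem pv_inner (cs : List Char) (acc : List Int) :
    (PySem.List.pyRange 1 (PySem.Chars.len cs) 1).foldl (fun invalid_ids chunk_size =>
      if PySem.Int.mod (PySem.Chars.len cs) chunk_size ≠ 0 then invalid_ids
      else
        let separate_strings := (PySem.List.pyRange 0 (PySem.Chars.len cs) chunk_size).map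
          (fun i => PySem.List.slice cs (some i) (some (i + chunk_size)))
        if separate_strings.all
            (fun chunks => chunks == (PySem.List.pyGet? separate_strings 0).getD [])
        then invalid_ids ++ [(PySem.Int.ofChars? cs).getD 0]
        else invalid_ids) acc
    = acc ++ ((PySem.List.pyRange 1 (PySem.Chars.len cs) 1).filter (pvCondA cs)).map (fun _ => pvKv cs) := by
  have hstep : (fun (invalid_ids : List Int) (chunk_size : Int) =>
      if PySem.Int.mod (PySem.Chars.len cs) chunk_size ≠ 0 then invalid_ids
      else
        let separate_strings := (PySem.List.pyRange 0 (PySem.Chars.len cs) chunk_size).map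
          (fun i => PySem.List.slice cs (some i) (some (i + chunk_size)))
        if separate_strings.all
            (fun chunks => chunks == (PySem.List.pyGet? separate_strings 0).getD [])
        then invalid_ids ++ [(PySem.Int.ofChars? cs).getD 0]
        else invalid_ids)
      = (fun invalid_ids chunk_size =>
        if pvCondA cs chunk_size = true then invalid_ids ++ [pvKv cs] else invalid_ids) := by
    funext acc c
    show (if PySem.Int.mod (PySem.Chars.len cs) c ≠ 0 then acc
        else if pvAllB cs c then acc ++ [pvKv cs] else acc)
      = if pvCondA cs c = true then acc ++ [pvKv cs] else acc
    rw [pvCondA, PySem.Chars.len_eq]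
    by_cases hm : PySem.Int.mod ((cs.length : Int)) c = 0
    · rw [if_neg (by simp [hm])]
      simp [hm]
    · rw [if_pos hm, if_neg]
      simp [hm]
  rw [hstep, PySem.List.foldl_append_if]

-- pvPerEx forces a nonempty value
theorem pv_perEx_ne (cs : List Char) (h : pvPerEx cs) : cs ≠ [] := by
  obtain ⟨d, h1, h2, _, _⟩ := h
  intro hnil
  rw [hnil] at h2
  simp at h2

-- the two loops agree, set-accumulator against list-accumulator
theorem pv_main (values : List String) : ∀ (acc : List Int) (s : PySem.Set Int),
    PySem.Set.ofList acc = s →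
    PySem.Set.ofList (values.foldl (fun invalid_ids value =>
      let cs := value.toList
      let value_length : Int := PySem.Chars.len cs
      (PySem.List.pyRange 1 value_length 1).foldl (fun invalid_ids chunk_size =>
        if PySem.Int.mod value_length chunk_size ≠ 0 then invalid_ids
        else
          let separate_strings := (PySem.List.pyRange 0 value_length chunk_size).map
            (fun i => PySem.List.slice cs (some i) (some (i + chunk_size)))
          if separate_strings.all
              (fun chunks => chunks == (PySem.List.pyGet? separate_strings 0).getD [])
          then invalid_ids ++ [(PySem.Int.ofChars? cs).getD 0]
          else invalid_ids) invalid_ids) acc)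
    = values.foldl (fun invalid_ids value =>
      let cs := value.toList
      if cs ≠ [] ∧ PySem.Chars.isIn cs (PySem.List.slice (cs ++ cs) (some 1) (some (-1))) = true
      then PySem.Set.add invalid_ids ((PySem.Int.ofChars? cs).getD 0)
      else invalid_ids) s := by
  induction values with
  | nil => intro acc s h; simpa using h
  | cons v vs ih =>
    intro acc s h
    simp only [List.foldl_cons]
    apply ih
    rw [pv_inner v.toList acc]
    by_cases hper : pvPerEx v.toList
    · have hfil : (PySem.List.pyRange 1 (PySem.Chars.len v.toList) 1).filter (pvCondA v.toList) ≠ [] := by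
        intro hnil
        rw [List.filter_eq_nil_iff] at hnil
        obtain ⟨d, hmem, hcond⟩ := (pv_exists_iff v.toList).mpr hper
        exact hnil d hmem hcond
      have hcondB : v.toList ≠ [] ∧
          PySem.Chars.isIn v.toList (PySem.List.slice (v.toList ++ v.toList) (some 1) (some (-1))) = true :=
        ⟨pv_perEx_ne _ hper, (pv_isin_iff v.toList (pv_perEx_ne _ hper)).mpr hper⟩
      rw [if_pos hcondB, PySem.Set.ofList_append,
        pv_update_const (pvKv v.toList) _
          (by intro hc; exact hfil (List.map_eq_nil_iff.mp hc))
          (by intro x hx; obtain ⟨_, _, rfl⟩ := List.mem_map.mp hx; rfl),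
        h]
      rfl
    · have hfil : (PySem.List.pyRange 1 (PySem.Chars.len v.toList) 1).filter (pvCondA v.toList) = [] := by
        rw [List.filter_eq_nil_iff]
        intro d hmem hcond
        exact hper ((pv_exists_iff v.toList).mp ⟨d, hmem, hcond⟩)
      rw [hfil]
      simp only [List.map_nil, List.append_nil]
      rw [if_neg, h]
      rintro ⟨hne, hisin⟩
      exact hper ((pv_isin_iff v.toList hne).mp hisin)

-- ===== VERDICT (by name: the statement is the Claim_ definition above) =====
theorem invalid_ids_within_range_spec : Claim_equal_invalid_ids_within_range := by
  intro range_values _hdom _hpre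
  unfold Spec_invalid_ids_within_range invalid_ids_within_range invalid_ids_within_range_alt
  exact pv_main range_values [] PySem.Set.empty rfl
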